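-- pv_equiv track=rewrite | github.com/DevDumDum/C-FlowChart_Python | App.py | whileLoopFormatFix
-- ===== SOURCE A (Python) =====
-- def whileLoopFormatFix(func, whileIncrement):
--     total = len(func[2])
--     x = total-1
--     endLoopNum = len(whileIncrement)-1
--     while x >= 0:
--         if func[0][x] == "endloop":
--             func[3][x] = whileIncrement[endLoopNum]
--             endLoopNum-=1
--         x-=1
--     return func
-- ===== SOURCE B (Python) =====
-- def whileLoopFormatFix(func, whileIncrement):
--     total = len(func[2])
--     ends = [i for i in range(total) if func[0][i] == "endloop"]
--     off = len(whileIncrement) - len(ends)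
--     for j, idx in enumerate(ends):
--         func[3][idx] = whileIncrement[off + j]
--     return func
-- ===== Notes on version B (the rewrite author's own statement) =====
-- stated objective: alternative
-- what changed: A's single reverse while-loop with a decrementing whileIncrement pointer is replaced by two forward passes: first build the list of endloop indices, then assign whileIncrement[len(whileIncrement)-m+j] to the j-th endloop position.
import Mathlib
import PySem

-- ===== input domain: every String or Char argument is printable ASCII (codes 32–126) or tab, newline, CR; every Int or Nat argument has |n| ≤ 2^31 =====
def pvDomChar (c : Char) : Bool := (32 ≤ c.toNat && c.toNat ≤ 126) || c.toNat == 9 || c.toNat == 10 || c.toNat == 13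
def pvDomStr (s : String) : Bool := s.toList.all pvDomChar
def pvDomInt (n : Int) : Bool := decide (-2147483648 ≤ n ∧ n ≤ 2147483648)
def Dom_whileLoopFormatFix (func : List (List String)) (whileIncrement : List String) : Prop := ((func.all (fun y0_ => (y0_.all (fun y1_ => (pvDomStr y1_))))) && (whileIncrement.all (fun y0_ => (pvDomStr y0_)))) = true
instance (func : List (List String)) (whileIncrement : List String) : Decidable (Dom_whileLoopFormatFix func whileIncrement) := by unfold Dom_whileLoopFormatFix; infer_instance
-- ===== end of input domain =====

-- B replaces A's reverse in-place scan by an endloop-index table plus a forward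
-- assignment pass (alternative decomposition, same cost). Both A and B mutate
-- func[3] in place in Python; the equivalence proved here is about the return value.

-- ===== PORT A =====
-- the while-loop: counter n = x+1, state = func[3] and endLoopNum
def whileAuxA (func0 whileIncrement : List String) : Nat → List String → Int → List String
  | 0, f3, _ => f3
  | n + 1, f3, e =>
    if func0.getD n "" = "endloop" then
      whileAuxA func0 whileIncrement n (f3.set n ((PySem.List.pyGet? whileIncrement e).getD "")) (e - 1)
    else
      whileAuxA func0 whileIncrement n f3 e

def whileLoopFormatFix (func : List (List String)) (whileIncrement : List String) : List (List String) :=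
  let total := (func.getD 2 []).length
  func.set 3 (whileAuxA (func.getD 0 []) whileIncrement total (func.getD 3 []) ((whileIncrement.length : Int) - 1))

-- ===== PORT B =====
-- ends = [i for i in range(total) if func[0][i] == "endloop"]
def endloopIdxs (func0 : List String) (total : Nat) : List Nat :=
  (List.range total).filter (fun i => func0.getD i "" = "endloop")

def whileLoopFormatFix_alt (func : List (List String)) (whileIncrement : List String) : List (List String) :=
  let total := (func.getD 2 []).length
  let ends := endloopIdxs (func.getD 0 []) total
  let off : Int := (whileIncrement.length : Int) - (ends.length : Int)
  func.set 3 (ends.zipIdx.foldl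
    (fun f3 p => f3.set p.1 ((PySem.List.pyGet? whileIncrement (off + (p.2 : Int))).getD ""))
    (func.getD 3 []))

-- ===== PRECONDITION & SPEC =====
-- exactly the inputs on which Python A returns without an IndexError:
-- func has the three rows it reads, row 0 covers row 2's length, every endloop
-- position fits in row 3, and the endloop count stays within Python's negative-index
-- reach of whileIncrement
def Pre_whileLoopFormatFix (func : List (List String)) (whileIncrement : List String) : Prop :=
  3 ≤ func.length ∧
  (func.getD 2 []).length ≤ (func.getD 0 []).length ∧
  (∀ i ∈ List.range (func.getD 2 []).length,
      (func.getD 0 []).getD i "" = "endloop" → i < (func.getD 3 []).length) ∧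
  (endloopIdxs (func.getD 0 []) (func.getD 2 []).length).length ≤ 2 * whileIncrement.length
instance (func : List (List String)) (whileIncrement : List String) : Decidable (Pre_whileLoopFormatFix func whileIncrement) := by unfold Pre_whileLoopFormatFix; infer_instance

def pvWitness_whileLoopFormatFix : List (List String) × List String :=
  ([["endloop"], ["x"], ["a"], ["y"]], ["inc"])

def Spec_whileLoopFormatFix (func : List (List String)) (whileIncrement : List String) (out : List (List String)) : Prop := out = whileLoopFormatFix_alt func whileIncrement
instance (func : List (List String)) (whileIncrement : List String) (out : List (List String)) : Decidable (Spec_whileLoopFormatFix func whileIncrement out) := by unfold Spec_whileLoopFormatFix; infer_instance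

-- ===== CLAIM (what is proved, stated in full; the proofs are below) =====
def Claim_equal_whileLoopFormatFix : Prop := ∀ (func : List (List String)) (whileIncrement : List String), Dom_whileLoopFormatFix func whileIncrement → Pre_whileLoopFormatFix func whileIncrement → Spec_whileLoopFormatFix func whileIncrement (whileLoopFormatFix func whileIncrement)

-- ===== LEMMAS AND PROOFS =====

-- B's assignment pass as a standalone function of the offset
def applyEnds (whileIncrement : List String) (off : Int) (l : List (Nat × Nat)) (f3 : List String) : List String :=
  l.foldl (fun f3 p => f3.set p.1 ((PySem.List.pyGet? whileIncrement (off + (p.2 : Int))).getD "")) f3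

theorem applyEnds_set_comm (wI : List String) (off : Int) (l : List (Nat × Nat))
    (f3 : List String) (n : Nat) (v : String) (h : ∀ p ∈ l, p.1 ≠ n) :
    applyEnds wI off l (f3.set n v) = (applyEnds wI off l f3).set n v := by
  induction l generalizing f3 with
  | nil => rfl
  | cons p l ih =>
    simp only [applyEnds, List.foldl_cons] at *
    rw [List.set_comm v _ (Ne.symm (h p (by simp))), ih _ (fun q hq => h q (by simp [hq]))]

theorem applyEnds_append_single (wI : List String) (off : Int) (l : List (Nat × Nat))
    (q : Nat × Nat) (f3 : List String) :
    applyEnds wI off (l ++ [q]) f3 =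
      (applyEnds wI off l f3).set q.1 ((PySem.List.pyGet? wI (off + (q.2 : Int))).getD "") := by
  simp [applyEnds, List.foldl_append]

theorem endloopIdxs_succ (f0 : List String) (n : Nat) :
    endloopIdxs f0 (n + 1) =
      endloopIdxs f0 n ++ (if f0.getD n "" = "endloop" then [n] else []) := by
  by_cases h : f0.getD n "" = "endloop" <;>
    simp only [List.getD_eq_getElem?_getD] at h <;>
    simp [endloopIdxs, List.range_succ, List.filter_append, h]

theorem mem_endloopIdxs_lt (f0 : List String) (n : Nat) (i : Nat)
    (h : i ∈ endloopIdxs f0 n) : i < n :=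
  List.mem_range.mp (List.mem_of_mem_filter h)

theorem whileAuxA_eq_applyEnds (f0 wI : List String) (n : Nat) (f3 : List String) (e : Int) :
    whileAuxA f0 wI n f3 e =
      applyEnds wI (e + 1 - ((endloopIdxs f0 n).length : Int)) ((endloopIdxs f0 n).zipIdx) f3 := by
  induction n generalizing f3 e with
  | zero => simp [whileAuxA, endloopIdxs, applyEnds]
  | succ n ih =>
    rw [whileAuxA, endloopIdxs_succ]
    split_ifs with h
    · rw [ih, List.zipIdx_append]
      have hsingle : ([n] : List Nat).zipIdx (0 + (endloopIdxs f0 n).length)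
          = [(n, (endloopIdxs f0 n).length)] := by simp [List.zipIdx]
      rw [hsingle, applyEnds_append_single]
      rw [applyEnds_set_comm wI _ _ f3 n _ (by
        intro p hp
        have hmem : p.1 ∈ endloopIdxs f0 n :=
          List.mem_of_getElem? (List.mem_zipIdx_iff_getElem?.mp hp)
        exact Nat.ne_of_lt (mem_endloopIdxs_lt f0 n p.1 hmem))]
      have hlen : (((endloopIdxs f0 n ++ [n]).length : Nat) : Int)
          = ((endloopIdxs f0 n).length : Int) + 1 := by
        simp
      rw [hlen]
      have h1 : e - 1 + 1 - ((endloopIdxs f0 n).length : Int)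
          = e + 1 - (((endloopIdxs f0 n).length : Int) + 1) := by ring
      have h2 : (e + 1 - (((endloopIdxs f0 n).length : Int) + 1))
          + ((endloopIdxs f0 n).length : Int) = e := by ring
      rw [h1, h2]
    · rw [ih]
      simp

theorem whileLoopFormatFix_eq_alt (func : List (List String)) (wI : List String) :
    whileLoopFormatFix func wI = whileLoopFormatFix_alt func wI := by
  simp only [whileLoopFormatFix, whileLoopFormatFix_alt]
  rw [whileAuxA_eq_applyEnds]
  unfold applyEnds
  have harith : (wI.length : Int) - 1 + 1
      - ((endloopIdxs (func.getD 0 []) (func.getD 2 []).length).length : Int)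
      = (wI.length : Int) - ((endloopIdxs (func.getD 0 []) (func.getD 2 []).length).length : Int) := by
    ring
  rw [harith]

-- ===== VERDICT (by name: the statement is the Claim_ definition above) =====
theorem whileLoopFormatFix_spec : Claim_equal_whileLoopFormatFix := by
  intro func wI _ _
  unfold Spec_whileLoopFormatFix
  exact whileLoopFormatFix_eq_alt func wI
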